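-- pv_equiv track=rewrite | github.com/edpowers/multiuse | src/multiuse/words/rule_based_reductions.py | normalize_to_base_terms
-- ===== SOURCE A (Python) =====
-- from collections import defaultdict
-- from collections.abc import Sequence
--
-- def normalize_to_base_terms(
--     terms: Sequence[str],
--     minimum_word_length_match: int = 3,
-- ) -> list[str]:
--     """Collapse similar long terms to their 4-word base."""
--
--     base_groups: defaultdict[str, list[str]] = defaultdict(list)
--     short_terms = []
--
--     for term in terms:
--         words = term.split()
--
--         if len(words) <= minimum_word_length_match:
--             short_terms.append(term)
--             continue
--
--         # Extract first 4 words as base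
--         base = " ".join(words[:minimum_word_length_match])
--         base_groups[base].append(term)
--
--     # Keep only base if multiple variants exist
--     result = short_terms.copy()
--     for base, variants in base_groups.items():
--         if len(variants) > 1:
--             result.append(base)  # Just the base
--         else:
--             result.append(variants[0])  # Keep full term if singleton
--
--     return sorted(set(result))
-- ===== SOURCE B (Python) =====
-- from collections import Counter
-- from collections.abc import Sequence
--
--
-- def normalize_to_base_terms(
--     terms: Sequence[str],
--     minimum_word_length_match: int = 3,
-- ) -> list[str]:
--     """Collapse similar long terms to their base prefix (counting pass, no grouping dict)."""
--     counts = Counter(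
--         " ".join(term.split()[:minimum_word_length_match])
--         for term in terms
--         if len(term.split()) > minimum_word_length_match
--     )
--     result = []
--     for term in terms:
--         words = term.split()
--         if len(words) <= minimum_word_length_match:
--             result.append(term)
--         else:
--             base = " ".join(words[:minimum_word_length_match])
--             result.append(base if counts[base] > 1 else term)
--     return sorted(set(result))
-- ===== Notes on version B (the rewrite author's own statement) =====
-- stated objective: alternative
-- what changed: Replaces A's defaultdict-of-lists grouping (collect every variant per base, then decide per group) by a Counter of base keys plus a second per-term pass that emits the base or the term directly, relying on the final set() to dedup repeated bases.
import Mathlib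
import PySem

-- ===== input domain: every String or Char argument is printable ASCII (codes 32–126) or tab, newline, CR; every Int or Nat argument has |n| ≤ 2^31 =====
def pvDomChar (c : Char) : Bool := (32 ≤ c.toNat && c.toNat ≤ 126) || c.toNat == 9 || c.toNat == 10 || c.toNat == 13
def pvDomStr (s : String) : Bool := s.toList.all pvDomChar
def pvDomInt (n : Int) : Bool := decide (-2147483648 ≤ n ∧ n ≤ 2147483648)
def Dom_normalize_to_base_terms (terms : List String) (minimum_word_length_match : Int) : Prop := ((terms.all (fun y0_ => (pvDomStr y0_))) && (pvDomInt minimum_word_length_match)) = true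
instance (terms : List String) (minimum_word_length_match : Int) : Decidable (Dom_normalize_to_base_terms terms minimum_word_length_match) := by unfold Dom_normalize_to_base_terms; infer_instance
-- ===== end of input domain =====

-- B replaces A's dict-of-lists grouping by a counting pass over base keys plus a per-term
-- second pass (objective: alternative decomposition, same asymptotic cost).


-- ===== PORT A =====
-- literal port of A: one pass splitting into short_terms and a defaultdict(list) keyed by the
-- base prefix (base_groups[base].append(term) = modify base [] (· ++ [term])), then a pass over
-- the dict's items appending the base for multi-member groups, else variants[0]
-- (variants is never empty, so the total pyGetD form of variants[0] is exact; A is total).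
def normalize_to_base_terms (terms : List String) (minimum_word_length_match : Int) : List String :=
  let st := terms.foldl
    (fun (st : PySem.Dict String (List String) × List String) term =>
      let words := PySem.Str.split₀ term
      if ((words.length : Int) ≤ minimum_word_length_match) then
        (st.1, st.2 ++ [term])
      else
        let base := PySem.Str.join " " (PySem.List.slice words none (some minimum_word_length_match))
        (st.1.modify base [] (· ++ [term]), st.2))
    (PySem.Dict.empty, [])
  let result := st.1.items.foldl
    (fun acc p => if 1 < p.2.length then acc ++ [p.1] else acc ++ [PySem.List.pyGetD p.2 0 ""])
    st.2
  PySem.List.sorted (PySem.Set.ofList result) (fun x => x) false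

-- ===== PORT B =====
-- literal port of B (Source B): Counter over the base keys of the long terms, then one pass over
-- terms emitting the term itself (short, or unique base) or its base (counts[base] > 1).
def normalize_to_base_terms_alt (terms : List String) (minimum_word_length_match : Int) : List String :=
  let counts := PySem.Dict.counter
    ((terms.filter
        (fun term => decide (minimum_word_length_match < ((PySem.Str.split₀ term).length : Int)))).map
      (fun term => PySem.Str.join " " (PySem.List.slice (PySem.Str.split₀ term) none (some minimum_word_length_match))))
  let result := terms.foldl
    (fun acc term =>
      let words := PySem.Str.split₀ term
      if ((words.length : Int) ≤ minimum_word_length_match) then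
        acc ++ [term]
      else
        let base := PySem.Str.join " " (PySem.List.slice words none (some minimum_word_length_match))
        acc ++ [if 1 < counts.getD base 0 then base else term])
    []
  PySem.List.sorted (PySem.Set.ofList result) (fun x => x) false

-- ===== PRECONDITION & SPEC =====
def Spec_normalize_to_base_terms (terms : List String) (minimum_word_length_match : Int) (out : List String) : Prop := out = normalize_to_base_terms_alt terms minimum_word_length_match
instance (terms : List String) (minimum_word_length_match : Int) (out : List String) : Decidable (Spec_normalize_to_base_terms terms minimum_word_length_match out) := by unfold Spec_normalize_to_base_terms; infer_instance

-- ===== CLAIM (what is proved, stated in full; the proofs are below) =====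
def Claim_equal_normalize_to_base_terms : Prop := ∀ (terms : List String) (minimum_word_length_match : Int), Dom_normalize_to_base_terms terms minimum_word_length_match → Spec_normalize_to_base_terms terms minimum_word_length_match (normalize_to_base_terms terms minimum_word_length_match)

-- ===== LEMMAS AND PROOFS =====

-- a term is "long" iff its word count exceeds the threshold
def pvLong (m : Int) (t : String) : Bool := decide (m < ((PySem.Str.split₀ t).length : Int))

-- the base prefix of a term
def pvBase (m : Int) (t : String) : String :=
  PySem.Str.join " " (PySem.List.slice (PySem.Str.split₀ t) none (some m))

-- a foldl that appends exactly one element per step is a map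
theorem pv_foldl_if_append {α β : Type} (P : α → Prop) [DecidablePred P] (f g : α → β) :
    ∀ (l : List α) (s : List β),
      l.foldl (fun acc x => if P x then acc ++ [f x] else acc ++ [g x]) s =
        s ++ l.map (fun x => if P x then f x else g x) := by
  intro l
  induction l with
  | nil => simp
  | cons x xs ih =>
    intro s
    by_cases h : P x <;> simp [h, ih, List.append_assoc]

-- A's first loop splits into the grouping fold over the long terms and the short terms
theorem pv_foldA_split (m : Int) :
    ∀ (ts : List String) (d : PySem.Dict String (List String)) (s : List String),
      ts.foldl
        (fun (st : PySem.Dict String (List String) × List String) term =>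
          let words := PySem.Str.split₀ term
          if ((words.length : Int) ≤ m) then
            (st.1, st.2 ++ [term])
          else
            let base := PySem.Str.join " " (PySem.List.slice words none (some m))
            (st.1.modify base [] (· ++ [term]), st.2))
        (d, s) =
      (((ts.filter (pvLong m)).map (fun t => (pvBase m t, t))).foldl
          (fun d p => d.modify p.1 [] (· ++ [p.2])) d,
        s ++ ts.filter (fun t => ¬ pvLong m t)) := by
  intro ts
  induction ts with
  | nil => simp
  | cons t ts ih =>
    intro d s
    by_cases h : ((PySem.Str.split₀ t).length : Int) ≤ m
    · have hl : pvLong m t = false := by simp [pvLong]; omega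
      simp only [List.foldl_cons, if_pos h, ih, List.filter_cons, hl]
      simp [List.append_assoc]
    · have hl : pvLong m t = true := by simp [pvLong]; omega
      simp only [List.foldl_cons, if_neg h, ih, List.filter_cons, hl]
      simp [pvBase]

-- the value a term contributes to B's result list
def pvFB (m : Int) (cnt : String → Int) (t : String) : String :=
  if ((PySem.Str.split₀ t).length : Int) ≤ m then t
  else if 1 < cnt (pvBase m t) then pvBase m t else t

-- group of long terms sharing a base
def pvGroup (m : Int) (terms : List String) (b : String) : List String :=
  (terms.filter (pvLong m)).filter (fun t => pvBase m t == b)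

-- the count of a base among the long terms is the size of its group
theorem pv_count_eq_group_length (m : Int) (terms : List String) (b : String) :
    ((terms.filter (pvLong m)).map (pvBase m)).count b = (pvGroup m terms b).length := by
  rw [List.count_eq_countP, List.countP_map, pvGroup, ← List.countP_eq_length_filter]
  rfl

-- the value A's second loop contributes for a base
def pvDec (m : Int) (terms : List String) (b : String) : String :=
  if 1 < (pvGroup m terms b).length then b else PySem.List.pyGetD (pvGroup m terms b) 0 ""

-- membership in A's raw result list equals membership in B's raw result list
theorem pv_mem_iff (m : Int) (terms : List String) (x : String) :
    (x ∈ terms.filter (fun t => ¬ pvLong m t) ∨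
       ∃ b ∈ PySem.Set.ofList ((terms.filter (pvLong m)).map (pvBase m)), x = pvDec m terms b) ↔
      ∃ t ∈ terms, x = pvFB m (fun b => (((pvGroup m terms b).length : Nat) : Int)) t := by
  constructor
  · rintro (hs | ⟨b, hb, rfl⟩)
    · rcases List.mem_filter.mp hs with ⟨ht, hshort⟩
      refine ⟨x, ht, ?_⟩
      have : ¬ pvLong m x = true := by simpa using hshort
      simp only [pvLong, decide_eq_true_eq, not_lt] at this
      simp [pvFB, this]
    · rw [PySem.Set.mem_ofList _ _] at hb
      rcases List.mem_map.mp hb with ⟨t, htl, rfl⟩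
      have hlong : pvLong m t = true := (List.mem_filter.mp htl).2
      have hlen : ¬ (((PySem.Str.split₀ t).length : Int) ≤ m) := by
        simpa [pvLong] using hlong
      have htg : t ∈ pvGroup m terms (pvBase m t) := by
        exact List.mem_filter.mpr ⟨htl, by simp⟩
      refine ⟨t, (List.mem_filter.mp htl).1, ?_⟩
      by_cases hgt : 1 < (pvGroup m terms (pvBase m t)).length
      · have : (1 : Int) < ((pvGroup m terms (pvBase m t)).length : Int) := by exact_mod_cast hgt
        simp [pvDec, pvFB, hgt, hlen, this]
      · have h1 : (pvGroup m terms (pvBase m t)).length = 1 := by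
          have : 0 < (pvGroup m terms (pvBase m t)).length := List.length_pos_of_mem htg
          omega
        rcases List.length_eq_one_iff.mp h1 with ⟨a, ha⟩
        have hta : t = a := by rw [ha] at htg; simpa using htg
        have hc : ¬ ((1 : Int) < ((pvGroup m terms (pvBase m t)).length : Int)) := by
          rw [h1]; omega
        simp [pvDec, pvFB, hlen, ha, ← hta, PySem.List.pyGetD_zero_cons]
  · rintro ⟨t, ht, rfl⟩
    by_cases hlen : ((PySem.Str.split₀ t).length : Int) ≤ m
    · left
      have : pvLong m t = false := by simp [pvLong]; omega
      simp [pvFB, hlen, List.mem_filter, ht, this]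
    · right
      have hlong : pvLong m t = true := by simp [pvLong]; omega
      have htl : t ∈ terms.filter (pvLong m) := List.mem_filter.mpr ⟨ht, hlong⟩
      have htg : t ∈ pvGroup m terms (pvBase m t) := by
        exact List.mem_filter.mpr ⟨htl, by simp⟩
      refine ⟨pvBase m t, (PySem.Set.mem_ofList _ _).mpr (List.mem_map.mpr ⟨t, htl, rfl⟩), ?_⟩
      rw [pvFB, if_neg hlen]
      by_cases hgt : 1 < (pvGroup m terms (pvBase m t)).length
      · have : (1 : Int) < ((pvGroup m terms (pvBase m t)).length : Int) := by exact_mod_cast hgt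
        simp [pvDec, hgt, this]
      · have h1 : (pvGroup m terms (pvBase m t)).length = 1 := by
          have : 0 < (pvGroup m terms (pvBase m t)).length := List.length_pos_of_mem htg
          omega
        rcases List.length_eq_one_iff.mp h1 with ⟨a, ha⟩
        have hta : t = a := by rw [ha] at htg; simpa using htg
        have hc : ¬ ((1 : Int) < ((pvGroup m terms (pvBase m t)).length : Int)) := by
          rw [h1]; omega
        simp [pvDec, ha, ← hta, PySem.List.pyGetD_zero_cons]

-- ===== VERDICT (by name: the statement is the Claim_ definition above) =====
-- A's value, in closed form: short terms ++ one decision per distinct base of a long term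
theorem pv_A_eq (terms : List String) (m : Int) :
    normalize_to_base_terms terms m =
      PySem.List.sorted
        (PySem.Set.ofList
          (terms.filter (fun t => ¬ pvLong m t) ++
            (PySem.Set.ofList ((terms.filter (pvLong m)).map (pvBase m))).map (pvDec m terms)))
        (fun x => x) false := by
  unfold normalize_to_base_terms
  rw [pv_foldA_split m terms PySem.Dict.empty []]
  have hnd :
      ((((terms.filter (pvLong m)).map (fun t => (pvBase m t, t))).foldl
          (fun d p => d.modify p.1 [] (· ++ [p.2])) PySem.Dict.empty)).keys.Nodup :=
    PySem.Dict.nodup_keys_foldl_modify_key _ Prod.fst [] (fun _ p => (· ++ [p.2])) _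
      PySem.Dict.nodup_keys_empty
  have hkeys :
      ((((terms.filter (pvLong m)).map (fun t => (pvBase m t, t))).foldl
          (fun d p => d.modify p.1 [] (· ++ [p.2])) PySem.Dict.empty)).keys =
        PySem.Set.ofList ((terms.filter (pvLong m)).map (pvBase m)) := by
    rw [PySem.Dict.keys_foldl_modify_key _ Prod.fst [] (fun _ p => (· ++ [p.2])) _]
    simp [PySem.Set.update_nil_left, List.map_map, Function.comp_def]
  have hget : ∀ c,
      ((((terms.filter (pvLong m)).map (fun t => (pvBase m t, t))).foldl
          (fun d p => d.modify p.1 [] (· ++ [p.2])) PySem.Dict.empty)).getD c [] =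
        pvGroup m terms c := by
    intro c
    rw [PySem.Dict.getD_foldl_modify_append]
    simp [pvGroup, List.filter_map, Function.comp_def, List.map_map, PySem.Dict.getD_empty]
  have hitems :
      ((((terms.filter (pvLong m)).map (fun t => (pvBase m t, t))).foldl
          (fun d p => d.modify p.1 [] (· ++ [p.2])) PySem.Dict.empty)).items =
        (PySem.Set.ofList ((terms.filter (pvLong m)).map (pvBase m))).map
          (fun b => (b, pvGroup m terms b)) := by
    rw [PySem.Dict.items_eq_map_keys _ hnd [], hkeys]
    exact List.map_congr_left (fun b _ => by rw [hget])
  simp only [hitems]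
  rw [pv_foldl_if_append (fun p : String × List String => 1 < p.2.length)
        (fun p => p.1) (fun p => PySem.List.pyGetD p.2 0 "")]
  simp only [List.map_map]
  rfl

-- B's value, in closed form: one emitted value per term
theorem pv_B_eq (terms : List String) (m : Int) :
    normalize_to_base_terms_alt terms m =
      PySem.List.sorted
        (PySem.Set.ofList
          (terms.map (pvFB m (fun b => (((pvGroup m terms b).length : Nat) : Int)))))
        (fun x => x) false := by
  simp only [normalize_to_base_terms_alt]
  rw [pv_foldl_if_append (fun t => ((PySem.Str.split₀ t).length : Int) ≤ m) (fun t => t)]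
  simp only [List.nil_append]
  congr 2
  apply List.map_congr_left
  intro t _
  by_cases h : ((PySem.Str.split₀ t).length : Int) ≤ m
  · simp [pvFB, h]
  · simp only [pvFB, if_neg h, PySem.Dict.getD_counter]
    have : (terms.filter
        (fun term => decide (m < ((PySem.Str.split₀ term).length : Int)))) =
        terms.filter (pvLong m) := rfl
    rw [this]
    rw [show ((terms.filter (pvLong m)).map
          (fun term => PySem.Str.join " "
            (PySem.List.slice (PySem.Str.split₀ term) none (some m)))) =
        (terms.filter (pvLong m)).map (pvBase m) from rfl]
    rw [show PySem.Str.join " " (PySem.List.slice (PySem.Str.split₀ t) none (some m)) = pvBase m t from rfl,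
        pv_count_eq_group_length m terms (pvBase m t)]

-- ===== VERDICT (by name: the statement is the Claim_ definition above) =====
theorem normalize_to_base_terms_spec : Claim_equal_normalize_to_base_terms := by
  intro terms m _
  unfold Spec_normalize_to_base_terms
  rw [pv_A_eq, pv_B_eq]
  apply PySem.List.sorted_eq_sorted_of_perm _ _ _ (fun a b h => h)
  apply (List.perm_ext_iff_of_nodup (PySem.Set.nodup_ofList _) (PySem.Set.nodup_ofList _)).mpr
  intro x
  rw [PySem.Set.mem_ofList _ _, PySem.Set.mem_ofList _ _]
  rw [List.mem_append, List.mem_map]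
  constructor
  · intro h'
    obtain ⟨t, ht, hx⟩ := (pv_mem_iff m terms x).mp (by
        rcases h' with h1 | ⟨a, ha, hax⟩
        · exact Or.inl h1
        · exact Or.inr ⟨a, ha, hax.symm⟩)
    exact List.mem_map.mpr ⟨t, ht, hx.symm⟩
  · intro h'
    obtain ⟨t, ht, hxt⟩ := List.mem_map.mp h'
    rcases (pv_mem_iff m terms x).mpr ⟨t, ht, hxt.symm⟩ with h1 | ⟨b, hb, hbx⟩
    · exact Or.inl h1
    · exact Or.inr ⟨b, hb, hbx.symm⟩
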